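-- pv_equiv track=rewrite | github.com/rasika2670/SmartWasteClassifier | backend/model/waste_mapper.py | map_to_waste_category
-- ===== SOURCE A (Python) =====
-- def map_to_waste_category(label):
--     label = label.lower()
--
--     # Biodegradable Waste
--     if any(word in label for word in ['banana', 'apple', 'food', 'peel', 'vegetable', 'fruit', 'leaves', 'tea bag', 'coffee grounds', 'bread']):
--         return "Biodegradable", "Dispose in compost bin"
--
--     # Recyclable - Plastic
--     elif any(word in label for word in ['plastic', 'bottle', 'bag', 'straw', 'container', 'wrap', 'cup', 'cap']):
--         return "Recyclable - Plastic", "Dispose in plastic recycling bin"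
--
--     # Recyclable - Metal
--     elif any(word in label for word in ['metal', 'can', 'foil', 'screw', 'aluminum', 'tin', 'iron']):
--         return "Recyclable - Metal", "Dispose in metal bin"
--
--     # Recyclable - Paper
--     elif any(word in label for word in ['paper', 'book', 'magazine', 'envelope', 'cardboard', 'newspaper', 'notebook', 'post-it', 'paper towel', 'wrapping paper', 'binder']):
--         return "Recyclable - Paper", "Dispose in paper bin"
--
--     # Recyclable - Glass
--     elif any(word in label for word in ['glass', 'jar', 'bottle', 'cup', 'container']):
--         return "Recyclable - Glass", "Dispose in glass recycling bin"
--
--     # Hazardous Waste (E-waste)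
--     elif any(word in label for word in ['battery','hard disk', 'hard disc', 'electronics', 'lightbulb', 'mobile', 'cellphone', 'charger', 'circuit board', 'tv', 'computer', 'laptop', 'remote']):
--         return "Hazardous Waste", "Send to e-waste recycling center"
--
--     # Recyclable - Textiles (Clothing)
--     elif any(word in label for word in ['t-shirt', 'jersey', 'shirt', 'pants', 'jacket', 'sweater', 'shoes', 'jeans', 'clothing', 'sarong','fabric', 'overskirt']):
--         return "Recyclable - Textiles", "Donate or recycle in textile bin"
--
--     # Electronic Waste (small devices)
--     elif any(word in label for word in ['charger', 'headphones', 'earphones', 'adapter', 'keyboard', 'mouse', 'monitor', 'tv', 'tablet']):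
--         return "Hazardous Waste - Electronics", "Send to e-waste recycling center"
--
--     # Recyclable - Batteries
--     elif any(word in label for word in ['lithium', 'rechargeable', 'alkaline', 'battery', 'car battery']):
--         return "Recyclable - Batteries", "Dispose in special battery recycling bin"
--
--     # Recyclable - Cartons
--     elif any(word in label for word in ['milk carton', 'juice carton', 'carton', 'tetra pak']):
--         return "Recyclable - Cartons", "Dispose in carton recycling bin"
--
--     # General Waste
--     else:
--         return "General Waste", "Dispose in general waste bin"
-- ===== SOURCE B (Python) =====
-- # B inverts the search: instead of testing every keyword against the label, it
-- # enumerates the label's substrings (up to the longest keyword) and looks each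
-- # up in a precomputed keyword->category hash, keeping the hit of highest
-- # priority (lowest table index).
-- WASTE_TABLE = [
--     ("Biodegradable", "Dispose in compost bin",
--      ['banana', 'apple', 'food', 'peel', 'vegetable', 'fruit', 'leaves', 'tea bag', 'coffee grounds', 'bread']),
--     ("Recyclable - Plastic", "Dispose in plastic recycling bin",
--      ['plastic', 'bottle', 'bag', 'straw', 'container', 'wrap', 'cup', 'cap']),
--     ("Recyclable - Metal", "Dispose in metal bin",
--      ['metal', 'can', 'foil', 'screw', 'aluminum', 'tin', 'iron']),
--     ("Recyclable - Paper", "Dispose in paper bin",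
--      ['paper', 'book', 'magazine', 'envelope', 'cardboard', 'newspaper', 'notebook', 'post-it', 'paper towel', 'wrapping paper', 'binder']),
--     ("Recyclable - Glass", "Dispose in glass recycling bin",
--      ['glass', 'jar', 'bottle', 'cup', 'container']),
--     ("Hazardous Waste", "Send to e-waste recycling center",
--      ['battery', 'hard disk', 'hard disc', 'electronics', 'lightbulb', 'mobile', 'cellphone', 'charger', 'circuit board', 'tv', 'computer', 'laptop', 'remote']),
--     ("Recyclable - Textiles", "Donate or recycle in textile bin",
--      ['t-shirt', 'jersey', 'shirt', 'pants', 'jacket', 'sweater', 'shoes', 'jeans', 'clothing', 'sarong', 'fabric', 'overskirt']),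
--     ("Hazardous Waste - Electronics", "Send to e-waste recycling center",
--      ['charger', 'headphones', 'earphones', 'adapter', 'keyboard', 'mouse', 'monitor', 'tv', 'tablet']),
--     ("Recyclable - Batteries", "Dispose in special battery recycling bin",
--      ['lithium', 'rechargeable', 'alkaline', 'battery', 'car battery']),
--     ("Recyclable - Cartons", "Dispose in carton recycling bin",
--      ['milk carton', 'juice carton', 'carton', 'tetra pak']),
-- ]
--
-- GENERAL = ("General Waste", "Dispose in general waste bin")
--
-- # keyword -> (priority, category, instruction); on duplicate keywords the
-- # earliest (highest-priority) table row wins, matching the chain's order.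
-- _INDEX = {}
-- for _p, (_cat, _instr, _kws) in enumerate(WASTE_TABLE):
--     for _w in _kws:
--         _INDEX.setdefault(_w, (_p, _cat, _instr))
-- _MAXLEN = max(len(_w) for _w in _INDEX)
--
--
-- def map_to_waste_category(label):
--     s = label.lower()
--     best = None
--     for i in range(len(s)):
--         for j in range(i + 1, i + _MAXLEN + 1):
--             hit = _INDEX.get(s[i:j])
--             if hit is not None and (best is None or hit[0] < best[0]):
--                 best = hit
--     return (best[1], best[2]) if best is not None else GENERAL
-- ===== Notes on version B (the rewrite author's own statement) =====
-- stated objective: alternative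
-- what changed: B inverts the search: instead of testing every keyword for containment in the label, it precomputes a keyword->(priority,category,instruction) hash from the table and scans the label's substrings (lengths 1..14, the longest keyword), keeping the hit with the smallest priority; A's chain order is preserved because duplicate keywords keep their first (highest-priority) row.
import Mathlib
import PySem

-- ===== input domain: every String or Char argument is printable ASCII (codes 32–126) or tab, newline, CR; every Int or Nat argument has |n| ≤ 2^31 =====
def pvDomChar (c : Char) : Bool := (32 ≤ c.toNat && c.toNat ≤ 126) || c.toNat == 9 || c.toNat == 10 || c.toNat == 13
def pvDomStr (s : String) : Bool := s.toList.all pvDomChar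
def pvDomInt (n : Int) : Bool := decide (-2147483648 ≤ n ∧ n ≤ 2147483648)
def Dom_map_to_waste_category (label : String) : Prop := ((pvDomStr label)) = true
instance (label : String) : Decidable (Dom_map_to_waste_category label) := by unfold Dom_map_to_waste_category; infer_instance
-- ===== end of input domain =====

-- B inverts the search: instead of testing every keyword against the label, it enumerates the
-- label's substrings (up to the longest keyword) and looks them up in a precomputed
-- keyword -> (priority, category, instruction) hash, keeping the highest-priority hit (alternative).

-- ===== PORT A =====
-- Literal port of A: lowercase once, then the if-elif chain of `any` substring tests.
def map_to_waste_category (label : String) : String × String :=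
  let label := PySem.Str.lower label
  if (["banana", "apple", "food", "peel", "vegetable", "fruit", "leaves", "tea bag", "coffee grounds", "bread"].any (fun word => PySem.Str.isIn word label)) then
    ("Biodegradable", "Dispose in compost bin")
  else if (["plastic", "bottle", "bag", "straw", "container", "wrap", "cup", "cap"].any (fun word => PySem.Str.isIn word label)) then
    ("Recyclable - Plastic", "Dispose in plastic recycling bin")
  else if (["metal", "can", "foil", "screw", "aluminum", "tin", "iron"].any (fun word => PySem.Str.isIn word label)) then
    ("Recyclable - Metal", "Dispose in metal bin")
  else if (["paper", "book", "magazine", "envelope", "cardboard", "newspaper", "notebook", "post-it", "paper towel", "wrapping paper", "binder"].any (fun word => PySem.Str.isIn word label)) then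
    ("Recyclable - Paper", "Dispose in paper bin")
  else if (["glass", "jar", "bottle", "cup", "container"].any (fun word => PySem.Str.isIn word label)) then
    ("Recyclable - Glass", "Dispose in glass recycling bin")
  else if (["battery", "hard disk", "hard disc", "electronics", "lightbulb", "mobile", "cellphone", "charger", "circuit board", "tv", "computer", "laptop", "remote"].any (fun word => PySem.Str.isIn word label)) then
    ("Hazardous Waste", "Send to e-waste recycling center")
  else if (["t-shirt", "jersey", "shirt", "pants", "jacket", "sweater", "shoes", "jeans", "clothing", "sarong", "fabric", "overskirt"].any (fun word => PySem.Str.isIn word label)) then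
    ("Recyclable - Textiles", "Donate or recycle in textile bin")
  else if (["charger", "headphones", "earphones", "adapter", "keyboard", "mouse", "monitor", "tv", "tablet"].any (fun word => PySem.Str.isIn word label)) then
    ("Hazardous Waste - Electronics", "Send to e-waste recycling center")
  else if (["lithium", "rechargeable", "alkaline", "battery", "car battery"].any (fun word => PySem.Str.isIn word label)) then
    ("Recyclable - Batteries", "Dispose in special battery recycling bin")
  else if (["milk carton", "juice carton", "carton", "tetra pak"].any (fun word => PySem.Str.isIn word label)) then
    ("Recyclable - Cartons", "Dispose in carton recycling bin")
  else
    ("General Waste", "Dispose in general waste bin")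

-- ===== PORT B =====
-- Source B's WASTE_TABLE
def wasteTable : List (String × String × List String) :=
  [ ("Biodegradable", "Dispose in compost bin",
      ["banana", "apple", "food", "peel", "vegetable", "fruit", "leaves", "tea bag", "coffee grounds", "bread"]),
    ("Recyclable - Plastic", "Dispose in plastic recycling bin",
      ["plastic", "bottle", "bag", "straw", "container", "wrap", "cup", "cap"]),
    ("Recyclable - Metal", "Dispose in metal bin",
      ["metal", "can", "foil", "screw", "aluminum", "tin", "iron"]),
    ("Recyclable - Paper", "Dispose in paper bin",
      ["paper", "book", "magazine", "envelope", "cardboard", "newspaper", "notebook", "post-it", "paper towel", "wrapping paper", "binder"]),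
    ("Recyclable - Glass", "Dispose in glass recycling bin",
      ["glass", "jar", "bottle", "cup", "container"]),
    ("Hazardous Waste", "Send to e-waste recycling center",
      ["battery", "hard disk", "hard disc", "electronics", "lightbulb", "mobile", "cellphone", "charger", "circuit board", "tv", "computer", "laptop", "remote"]),
    ("Recyclable - Textiles", "Donate or recycle in textile bin",
      ["t-shirt", "jersey", "shirt", "pants", "jacket", "sweater", "shoes", "jeans", "clothing", "sarong", "fabric", "overskirt"]),
    ("Hazardous Waste - Electronics", "Send to e-waste recycling center",
      ["charger", "headphones", "earphones", "adapter", "keyboard", "mouse", "monitor", "tv", "tablet"]),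
    ("Recyclable - Batteries", "Dispose in special battery recycling bin",
      ["lithium", "rechargeable", "alkaline", "battery", "car battery"]),
    ("Recyclable - Cartons", "Dispose in carton recycling bin",
      ["milk carton", "juice carton", "carton", "tetra pak"]) ]

def generalWaste : String × String := ("General Waste", "Dispose in general waste bin")

-- _INDEX: keyword -> (priority, category, instruction); setdefault keeps the first (highest-priority) row
def kwIndex : PySem.Dict String (Int × String × String) :=
  (PySem.List.enumerate wasteTable 0).foldl
    (fun d row => row.2.2.2.foldl (fun d w => d.setdefault w (row.1, row.2.1, row.2.2.1)) d)
    PySem.Dict.empty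

-- _MAXLEN = max(len(w) for w in _INDEX)
def kwMaxLen : Int := (PySem.List.max? (kwIndex.keys.map PySem.Str.len) (fun x => x)).getD 0

def map_to_waste_category_alt (label : String) : String × String :=
  let s := PySem.Str.lower label
  let best := (PySem.List.pyRange 0 (PySem.Str.len s) 1).foldl (fun best i =>
    (PySem.List.pyRange (i + 1) (i + kwMaxLen + 1) 1).foldl (fun best j =>
      match kwIndex.get? (PySem.Str.slice s (some i) (some j)) with
      | none => best
      | some hit =>
        match best with
        | none => some hit
        | some b => if hit.1 < b.1 then some hit else some b) best) none
  match best with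
  | some b => (b.2.1, b.2.2)
  | none => generalWaste

-- ===== PRECONDITION & SPEC =====
def Spec_map_to_waste_category (label : String) (out : String × String) : Prop := out = map_to_waste_category_alt label
instance (label : String) (out : String × String) : Decidable (Spec_map_to_waste_category label out) := by unfold Spec_map_to_waste_category; infer_instance

-- ===== CLAIM (what is proved, stated in full; the proofs are below) =====
def Claim_equal_map_to_waste_category : Prop := ∀ (label : String), Dom_map_to_waste_category label → Spec_map_to_waste_category label (map_to_waste_category label)

-- ===== LEMMAS AND PROOFS =====

-- spec-level views of the table
def tblRow (k : Nat) : String × String × List String := wasteTable.getD k ("", "", [])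
def tblKws (k : Nat) : List String := (tblRow k).2.2
def tblOut (k : Nat) : String × String := ((tblRow k).1, (tblRow k).2.1)
def hitOf (k : Nat) : Int × String × String := ((k : Int), (tblRow k).1, (tblRow k).2.1)
def matchRow (s : String) (k : Nat) : Bool := (tblKws k).any (fun w => PySem.Str.isIn w s)

-- A's chain as a first-match recursion over row indices
def chainFrom (s : String) (k : Nat) : String × String :=
  if h : k < 10 then (if matchRow s k then tblOut k else chainFrom s (k + 1)) else generalWaste
termination_by 10 - k

-- B's accumulator update
def updBest (best : Option (Int × String × String)) (o : Option (Int × String × String)) :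
    Option (Int × String × String) :=
  match o with
  | none => best
  | some hit =>
    match best with
    | none => some hit
    | some b => if hit.1 < b.1 then some hit else some b

-- the flat list of dictionary lookups B's two loops perform
def cands (s : String) : List (Option (Int × String × String)) :=
  (PySem.List.pyRange 0 (PySem.Str.len s) 1).flatMap (fun i =>
    (PySem.List.pyRange (i + 1) (i + 14 + 1) 1).map (fun j =>
      kwIndex.get? (PySem.Str.slice s (some i) (some j))))

set_option maxRecDepth 100000 in
lemma kwMaxLen_eq : kwMaxLen = 14 := by decide

set_option maxRecDepth 100000 in
-- every dictionary entry is a keyword of its (priority) row, with the right value and length ≤ 14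
lemma fact_items : ∀ pr ∈ kwIndex.items, ∃ k ∈ List.range 10,
    pr.2 = hitOf k ∧ pr.1 ∈ tblKws k ∧ 1 ≤ pr.1.toList.length ∧ pr.1.toList.length ≤ 14 := by
  decide

set_option maxRecDepth 100000 in
-- every keyword of row k is in the dictionary, mapped to a row p ≤ k that also contains it
lemma fact_lookup : ∀ k ∈ List.range 10, ∀ w ∈ tblKws k, ∃ p ∈ List.range (k + 1),
    kwIndex.get? w = some (hitOf p) ∧ w ∈ tblKws p ∧ 1 ≤ w.toList.length ∧ w.toList.length ≤ 14 := by
  decide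

lemma A_eq_chain (label : String) :
    map_to_waste_category label = chainFrom (PySem.Str.lower label) 0 := by
  simp [map_to_waste_category, chainFrom, matchRow, tblKws, tblRow, tblOut, wasteTable,
    generalWaste]

set_option maxHeartbeats 4000000 in
set_option maxRecDepth 100000 in
lemma alt_eq_cands (label : String) :
    map_to_waste_category_alt label =
      (match (cands (PySem.Str.lower label)).foldl updBest none with
       | some b => (b.2.1, b.2.2)
       | none => generalWaste) := by
  simp only [map_to_waste_category_alt, kwMaxLen_eq, cands, List.foldl_flatMap, List.foldl_map]
  rfl

-- a slice of s is contained in s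
lemma isIn_slice (s : String) (i j : Int) (hi : 0 ≤ i) (hj : 0 ≤ j) :
    PySem.Str.isIn (PySem.Str.slice s (some i) (some j)) s = true := by
  rw [PySem.Str.isIn_iff_infix]
  have hl : (PySem.Str.slice s (some i) (some j)).toList
      = PySem.List.slice s.toList (some i) (some j) := by simp [pysem]
  rw [hl, PySem.List.slice_toNat _ hi hj]
  exact ((List.take_prefix _ _).isInfix).trans (List.drop_suffix _ _).isInfix

-- a contained word of length 1..14 is a slice produced by B's loops
lemma exists_slice (s w : String) (hin : PySem.Str.isIn w s = true)
    (h1 : 1 ≤ w.toList.length) (h14 : w.toList.length ≤ 14) :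
    ∃ i j : Int, 0 ≤ i ∧ i < (PySem.Str.len s) ∧ i + 1 ≤ j ∧ j < i + 14 + 1 ∧
      PySem.Str.slice s (some i) (some j) = w := by
  rw [PySem.Str.isIn_iff_infix] at hin
  obtain ⟨t1, t2, heq⟩ := hin
  have hlen : PySem.Str.len s = (s.toList.length : Int) := by simp [pysem]
  refine ⟨(t1.length : Int), (t1.length : Int) + (w.toList.length : Int),
    by positivity, ?_, by omega, by omega, ?_⟩
  · rw [hlen, ← heq]
    simp only [List.length_append]
    push_cast
    omega
  · apply String.toList_inj.mp
    have hcast : ((t1.length : Int) + (w.toList.length : Int))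
        = ((t1.length + w.toList.length : Nat) : Int) := by push_cast; ring
    rw [hcast]
    have hsl : (PySem.Str.slice s (some (t1.length : Int))
          (some ((t1.length + w.toList.length : Nat) : Int))).toList
        = PySem.List.slice s.toList (some (t1.length : Int))
          (some ((t1.length + w.toList.length : Nat) : Int)) := by simp [pysem]
    rw [hsl, PySem.List.slice_natCast, ← heq]
    simp

lemma cands_sound (s : String) (h : Int × String × String) (hmem : some h ∈ cands s) :
    ∃ k, k < 10 ∧ h = hitOf k ∧ matchRow s k = true := by
  unfold cands at hmem
  rw [List.mem_flatMap] at hmem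
  obtain ⟨i, hi, hmem⟩ := hmem
  rw [List.mem_map] at hmem
  obtain ⟨j, hj, hget⟩ := hmem
  rw [PySem.List.mem_pyRange_one] at hi hj
  have hitem := PySem.Dict.mem_items_of_get?_eq_some _ hget
  obtain ⟨k, hk, hv, hw, h1, h14⟩ := fact_items _ hitem
  rw [List.mem_range] at hk
  refine ⟨k, hk, hv, ?_⟩
  rw [matchRow, List.any_eq_true]
  exact ⟨_, hw, isIn_slice s i j (by omega) (by omega)⟩

lemma cands_complete (s : String) (k : Nat) (hk : k < 10) (hm : matchRow s k = true) :
    ∃ p, p ≤ k ∧ matchRow s p = true ∧ some (hitOf p) ∈ cands s := by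
  rw [matchRow, List.any_eq_true] at hm
  obtain ⟨w, hwk, hwin⟩ := hm
  obtain ⟨p, hp, hget, hwp, h1, h14⟩ := fact_lookup k (List.mem_range.mpr hk) w hwk
  rw [List.mem_range] at hp
  obtain ⟨i, j, hi0, hin, hij, hj15, hslice⟩ := exists_slice s w hwin h1 h14
  refine ⟨p, by omega, ?_, ?_⟩
  · rw [matchRow, List.any_eq_true]; exact ⟨w, hwp, hwin⟩
  · unfold cands
    rw [List.mem_flatMap]
    refine ⟨i, PySem.List.mem_pyRange_one.mpr ⟨hi0, hin⟩, ?_⟩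
    rw [List.mem_map]
    exact ⟨j, PySem.List.mem_pyRange_one.mpr ⟨hij, hj15⟩, by rw [hslice, hget]⟩

lemma fold_none (l : List (Option (Int × String × String)))
    (hall : ∀ o ∈ l, o = none) : l.foldl updBest none = none := by
  induction l with
  | nil => rfl
  | cons o t ih =>
    have ho := hall o (by simp)
    subst ho
    exact ih (fun o h => hall o (by simp [h]))

lemma fold_min (h0 : Int × String × String) :
    ∀ (l : List (Option (Int × String × String))) (acc : Option (Int × String × String)),
    (∀ h, some h ∈ l → h0.1 ≤ h.1 ∧ (h.1 = h0.1 → h = h0)) →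
    (some h0 ∈ l ∨ acc = some h0) →
    (acc = none ∨ ∃ h, acc = some h ∧ h0.1 ≤ h.1 ∧ (h.1 = h0.1 → h = h0)) →
    l.foldl updBest acc = some h0 := by
  intro l
  induction l with
  | nil =>
    intro acc hl hin hacc
    rcases hin with h | h
    · simp at h
    · simpa using h
  | cons o t ih =>
    intro acc hl hin hacc
    simp only [List.foldl_cons]
    apply ih
    · intro h hm
      exact hl h (List.mem_cons_of_mem _ hm)
    · rcases hin with hin | hin
      · rcases List.mem_cons.mp hin with ho | hint
        · right
          rcases hacc with hacc | ⟨b, hb, hble, hbeq⟩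
          · subst hacc; rw [← ho]; rfl
          · subst hb; rw [← ho]
            simp only [updBest]
            split_ifs with hlt
            · rfl
            · rw [hbeq (le_antisymm (not_lt.mp hlt) hble)]
        · left; exact hint
      · right
        subst hin
        cases o with
        | none => rfl
        | some hit =>
          have hle := (hl hit (by simp)).1
          simp only [updBest]
          split_ifs with hlt
          · exact absurd hlt (not_lt.mpr hle)
          · rfl
    · cases o with
      | none => simpa only [updBest] using hacc
      | some hit =>
        right
        have hhit := hl hit (by simp)
        rcases hacc with hacc | ⟨b, hb, hble, hbeq⟩
        · subst hacc; exact ⟨hit, rfl, hhit⟩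
        · subst hb
          simp only [updBest]
          split_ifs with hlt
          · exact ⟨hit, rfl, hhit⟩
          · exact ⟨b, rfl, hble, hbeq⟩

lemma chainFrom_first (s : String) (k0 : Nat) (h10 : k0 < 10) (hm : matchRow s k0 = true)
    (hmin : ∀ p, p < k0 → matchRow s p = false) :
    ∀ m a, k0 - a ≤ m → a ≤ k0 → chainFrom s a = tblOut k0 := by
  intro m
  induction m with
  | zero =>
    intro a h1 h2
    have : a = k0 := by omega
    subst this
    rw [chainFrom]
    simp [h10, hm]
  | succ m ih =>
    intro a h1 h2
    by_cases ha : a = k0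
    · subst ha
      rw [chainFrom]; simp [h10, hm]
    · have hlt : a < k0 := by omega
      rw [chainFrom]
      simp [show a < 10 by omega, hmin a hlt]
      exact ih (a + 1) (by omega) (by omega)

lemma chainFrom_general (s : String) (hall : ∀ p, p < 10 → matchRow s p = false) :
    ∀ m a, 10 - a ≤ m → chainFrom s a = generalWaste := by
  intro m
  induction m with
  | zero =>
    intro a h
    rw [chainFrom]
    simp [show ¬ a < 10 by omega]
  | succ m ih =>
    intro a h
    by_cases ha : a < 10
    · rw [chainFrom]
      simp [ha, hall a ha]
      exact ih (a + 1) (by omega)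
    · rw [chainFrom]; simp [ha]

-- ===== VERDICT (by name: the statement is the Claim_ definition above) =====
theorem map_to_waste_category_spec : Claim_equal_map_to_waste_category := by
  intro label _
  show map_to_waste_category label = map_to_waste_category_alt label
  rw [A_eq_chain, alt_eq_cands]
  set s := PySem.Str.lower label with hs
  by_cases hex : ∃ k, matchRow s k = true
  · -- some row matches: both sides return the first matching row's output
    have hk0m : matchRow s (Nat.find hex) = true := Nat.find_spec hex
    have hk0lt : Nat.find hex < 10 := by
      rcases Nat.lt_or_ge (Nat.find hex) 10 with h | h
      · exact h
      · exfalso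
        have hnil : tblKws (Nat.find hex) = [] := by
          unfold tblKws tblRow
          rw [List.getD_eq_default _ _ (by have hl : wasteTable.length = 10 := rfl; omega)]
        rw [matchRow, hnil] at hk0m
        simp at hk0m
    have hmin : ∀ p, p < Nat.find hex → matchRow s p = false := by
      intro p hp
      have := Nat.find_min hex hp
      simpa using this
    rw [chainFrom_first s (Nat.find hex) hk0lt hk0m hmin (Nat.find hex) 0 (by omega) (by omega)]
    have hfold : (cands s).foldl updBest none = some (hitOf (Nat.find hex)) := by
      apply fold_min
      · intro h hmem
        obtain ⟨k, hk10, hk, hkm⟩ := cands_sound s h hmem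
        have hle : Nat.find hex ≤ k := Nat.find_min' hex hkm
        subst hk
        constructor
        · simp only [hitOf]
          exact_mod_cast hle
        · intro he
          simp only [hitOf] at he ⊢
          have : k = Nat.find hex := by exact_mod_cast he
          rw [this]
      · left
        obtain ⟨p, hple, hpm, hpmem⟩ := cands_complete s (Nat.find hex) hk0lt hk0m
        have : Nat.find hex ≤ p := Nat.find_min' hex hpm
        have hpe : p = Nat.find hex := by omega
        rwa [hpe] at hpmem
      · left; rfl
    rw [hfold]
    simp [hitOf, tblOut]
  · -- no row matches: both sides return General Waste
    have hall : ∀ p, p < 10 → matchRow s p = false := by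
      intro p _
      rcases Bool.eq_false_or_eq_true (matchRow s p) with h | h
      · exact absurd ⟨p, h⟩ hex
      · exact h
    rw [chainFrom_general s hall 10 0 (by omega)]
    have : (cands s).foldl updBest none = none := by
      apply fold_none
      intro o ho
      cases o with
      | none => rfl
      | some h =>
        obtain ⟨k, _, _, hkm⟩ := cands_sound s h ho
        rw [hall k ‹k < 10›] at hkm
        exact absurd hkm (by simp)
    rw [this]
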